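-- pv_equiv track=rewrite | github.com/mate58/Progra-3 | 2 Greedy/Cintas.py | Cintas
-- ===== SOURCE A (Python) =====
-- def Cintas(cintas):
--     total_movimientos = 0
--
--     while (len(cintas) > 1):
--         cintas.sort()
--         c1 = cintas.pop(0)
--         c2 = cintas.pop(0)
--
--         movimiento = c1 + c2
--         total_movimientos += movimiento
--         cintas.append(movimiento)
--
--     return total_movimientos
-- ===== SOURCE B (Python) =====
-- def _pick(leaves, sums, i, j):
--     if i < len(leaves) and (j >= len(sums) or leaves[i] <= sums[j]):
--         return leaves[i], i + 1, j
--     return sums[j], i, j + 1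
--
--
-- def Cintas(cintas):
--     leaves = sorted(cintas)
--     sums = []
--     i = 0
--     j = 0
--     total = 0
--     while (len(leaves) - i) + (len(sums) - j) > 1:
--         v1, i, j = _pick(leaves, sums, i, j)
--         v2, i, j = _pick(leaves, sums, i, j)
--         m = v1 + v2
--         total += m
--         sums.append(m)
--     return total
-- ===== Notes on version B (the rewrite author's own statement) =====
-- stated objective: faster
-- what changed: Instead of re-sorting the whole list and popping the front twice on every merge, B sorts once and then consumes two already-sorted queues by index (the sorted originals and the FIFO queue of merge sums, which provably stays sorted), picking each minimum in O(1).
import Mathlib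
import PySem

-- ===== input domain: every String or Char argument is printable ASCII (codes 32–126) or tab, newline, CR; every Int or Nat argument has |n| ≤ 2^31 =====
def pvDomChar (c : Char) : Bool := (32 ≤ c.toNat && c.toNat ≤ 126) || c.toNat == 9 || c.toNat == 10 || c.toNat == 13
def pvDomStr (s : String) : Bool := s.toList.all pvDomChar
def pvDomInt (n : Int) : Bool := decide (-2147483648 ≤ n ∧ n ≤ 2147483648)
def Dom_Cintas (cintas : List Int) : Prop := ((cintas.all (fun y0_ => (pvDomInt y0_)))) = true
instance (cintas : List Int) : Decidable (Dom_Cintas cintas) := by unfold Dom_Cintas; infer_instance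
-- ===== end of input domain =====

-- B replaces A's sort-per-merge loop by one initial sort plus two index-scanned sorted
-- queues (originals and merge sums), giving O(n log n) instead of a sort per merge;
-- the equivalence is about the RETURN value only (Python A sorts/pops its argument in
-- place, B leaves it untouched).

-- ===== PORT A =====
-- cintas.sort() on a list of ints
def pySortI (l : List Int) : List Int := PySem.List.sorted l (fun x => x) false

-- the while-loop of A: sort, pop the two smallest from the front, append their sum.
-- The Nat fuel (one unit per iteration, cintas.length is enough) only makes the
-- recursion structural; it never changes the computed value.
def CintasGo : Nat → List Int → Int → Int
  | 0, _, total => total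
  | fuel + 1, l, total =>
    if 1 < l.length then
      match pySortI l with
      | c1 :: c2 :: rest => CintasGo fuel (rest ++ [c1 + c2]) (total + (c1 + c2))
      | _ => total          -- unreachable: sorting preserves length
    else total

def Cintas (cintas : List Int) : Int := CintasGo cintas.length cintas 0

-- ===== PORT B =====
-- _pick from Source B: take the smaller of leaves[i] and sums[j] (leaves on ties), advance its index
def altPick (leaves sums : List Int) (i j : Nat) : Int × Nat × Nat :=
  if i < leaves.length ∧ (j ≥ sums.length ∨ leaves.getD i 0 ≤ sums.getD j 0)
  then (leaves.getD i 0, i + 1, j)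
  else (sums.getD j 0, i, j + 1)

-- the while-loop of Source B (same fuel scheme: one unit per iteration)
def CintasAltGo : Nat → List Int → List Int → Nat → Nat → Int → Int
  | 0, _, _, _, _, total => total
  | fuel + 1, leaves, sums, i, j, total =>
    if 1 < (leaves.length - i) + (sums.length - j) then
      match altPick leaves sums i j with
      | (v1, i1, j1) =>
        match altPick leaves sums i1 j1 with
        | (v2, i2, j2) =>
          CintasAltGo fuel leaves (sums ++ [v1 + v2]) i2 j2 (total + (v1 + v2))
    else total

def Cintas_alt (cintas : List Int) : Int :=
  CintasAltGo cintas.length (pySortI cintas) [] 0 0 0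

-- ===== PRECONDITION & SPEC =====
def Spec_Cintas (cintas : List Int) (out : Int) : Prop := out = Cintas_alt cintas
instance (cintas : List Int) (out : Int) : Decidable (Spec_Cintas cintas out) := by unfold Spec_Cintas; infer_instance

-- ===== CLAIM (what is proved, stated in full; the proofs are below) =====
def Claim_equal_Cintas : Prop := ∀ (cintas : List Int), Dom_Cintas cintas → Spec_Cintas cintas (Cintas cintas)

-- ===== LEMMAS AND PROOFS =====

-- A's loop depends on its list only through the sorted list, so it is permutation-invariant
theorem CintasGo_perm (f : Nat) (l l' : List Int) (t : Int) (hp : l.Perm l') :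
    CintasGo f l t = CintasGo f l' t := by
  cases f with
  | zero => rfl
  | succ f =>
    have hsort : pySortI l = pySortI l' := by
      unfold pySortI
      exact (PySem.List.sorted_id_eq_sorted_id_iff_perm ..).mpr hp
    have hlen : l.length = l'.length := hp.length_eq
    rw [CintasGo, CintasGo, hlen, hsort]

-- the list-level picking step that altPick performs on the suffixes leaves.drop i, sums.drop j
def pickL : List Int → List Int → Int × List Int × List Int
  | [], [] => (0, [], [])
  | [], y :: qs' => (y, [], qs')
  | x :: ls', [] => (x, ls', [])
  | x :: ls', y :: qs' => if x ≤ y then (x, ls', y :: qs') else (y, x :: ls', qs')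

-- altPick agrees with pickL on the dropped suffixes
theorem altPick_bridge (leaves sums : List Int) (i j : Nat)
    (hi : i ≤ leaves.length) (hj : j ≤ sums.length)
    (hne : i < leaves.length ∨ j < sums.length) :
    ∃ v i' j', altPick leaves sums i j = (v, i', j') ∧ i' ≤ leaves.length ∧
      j' ≤ sums.length ∧ i' + j' = i + j + 1 ∧
      pickL (leaves.drop i) (sums.drop j) = (v, leaves.drop i', sums.drop j') := by
  by_cases hc : i < leaves.length ∧ (j ≥ sums.length ∨ leaves.getD i 0 ≤ sums.getD j 0)
  · obtain ⟨hiL, hor⟩ := hc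
    refine ⟨leaves.getD i 0, i + 1, j, ?_, by omega, hj, by omega, ?_⟩
    · simp only [altPick, if_pos (And.intro hiL hor)]
    · have hdl : leaves.drop i = leaves[i] :: leaves.drop (i + 1) :=
        List.drop_eq_getElem_cons hiL
      have hgd : leaves.getD i 0 = leaves[i] := List.getD_eq_getElem _ _ hiL
      rcases hor with hjS | hle
      · have hjeq : j = sums.length := le_antisymm hj hjS
        have hds : sums.drop j = [] := by simp [hjeq]
        rw [hdl, hds, hgd]
        rfl
      · by_cases hjS : j < sums.length
        · have hds : sums.drop j = sums[j] :: sums.drop (j + 1) :=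
            List.drop_eq_getElem_cons hjS
          have hgs : sums.getD j 0 = sums[j] := List.getD_eq_getElem _ _ hjS
          rw [hdl, hds, hgd, pickL]
          rw [hgd, hgs] at hle
          simp [hle]
        · have hjeq : j = sums.length := by omega
          have hds : sums.drop j = [] := by simp [hjeq]
          rw [hdl, hds, hgd]
          rfl
  · have h1 : altPick leaves sums i j = (sums.getD j 0, i, j + 1) := by
      simp only [altPick, if_neg hc]
    by_cases hiL : i < leaves.length
    · have hor' : ¬ (j ≥ sums.length ∨ leaves.getD i 0 ≤ sums.getD j 0) :=
        fun h => hc ⟨hiL, h⟩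
      have hjS : j < sums.length := by
        by_contra h
        exact hor' (Or.inl (by omega))
      have hlt : ¬ leaves.getD i 0 ≤ sums.getD j 0 := fun h => hor' (Or.inr h)
      refine ⟨sums.getD j 0, i, j + 1, h1, by omega, by omega, by omega, ?_⟩
      have hdl : leaves.drop i = leaves[i] :: leaves.drop (i + 1) :=
        List.drop_eq_getElem_cons hiL
      have hds : sums.drop j = sums[j] :: sums.drop (j + 1) :=
        List.drop_eq_getElem_cons hjS
      have hgd : leaves.getD i 0 = leaves[i] := List.getD_eq_getElem _ _ hiL
      have hgs : sums.getD j 0 = sums[j] := List.getD_eq_getElem _ _ hjS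
      rw [hgd, hgs] at hlt
      rw [hdl, hds, hgs, pickL, if_neg (by omega)]
    · have hieq : i = leaves.length := by omega
      have hjS : j < sums.length := by
        rcases hne with h | h
        · omega
        · exact h
      refine ⟨sums.getD j 0, i, j + 1, h1, hi, by omega, by omega, ?_⟩
      have hdl : leaves.drop i = [] := by simp [hieq]
      have hds : sums.drop j = sums[j] :: sums.drop (j + 1) :=
        List.drop_eq_getElem_cons hjS
      have hgs : sums.getD j 0 = sums[j] := List.getD_eq_getElem _ _ hjS
      rw [hdl, hds, hgs]
      rfl

-- what one pick does to two sorted queues: it removes a minimum of the union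
theorem pickL_spec (ls qs : List Int) (hne : ls ≠ [] ∨ qs ≠ [])
    (hls : ls.Pairwise (· ≤ ·)) (hqs : qs.Pairwise (· ≤ ·)) :
    ∃ v ls' qs', pickL ls qs = (v, ls', qs') ∧
      (ls ++ qs).Perm (v :: (ls' ++ qs')) ∧
      ls'.Pairwise (· ≤ ·) ∧ qs'.Pairwise (· ≤ ·) ∧
      (∀ z ∈ ls' ++ qs', v ≤ z) ∧
      (qs' = qs ∨ qs = v :: qs') ∧
      ls'.length + qs'.length + 1 = ls.length + qs.length := by
  match ls, qs with
  | [], [] => simp at hne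
  | [], y :: qs' =>
    refine ⟨y, [], qs', rfl, by simp, by simp, (List.pairwise_cons.mp hqs).2, ?_, Or.inr rfl, by simp⟩
    intro z hz
    simp at hz
    exact (List.pairwise_cons.mp hqs).1 z hz
  | x :: ls', [] =>
    refine ⟨x, ls', [], rfl, by simp, (List.pairwise_cons.mp hls).2, by simp, ?_, Or.inl rfl, by simp⟩
    intro z hz
    simp at hz
    exact (List.pairwise_cons.mp hls).1 z hz
  | x :: ls', y :: qs' =>
    by_cases hxy : x ≤ y
    · refine ⟨x, ls', y :: qs', by simp [pickL, hxy], by simp, (List.pairwise_cons.mp hls).2, hqs, ?_, Or.inl rfl, by simp; omega⟩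
      intro z hz
      rcases List.mem_append.mp hz with h | h
      · exact (List.pairwise_cons.mp hls).1 z h
      · rcases List.mem_cons.mp h with h | h
        · omega
        · exact le_trans hxy ((List.pairwise_cons.mp hqs).1 z h)
    · refine ⟨y, x :: ls', qs', by simp [pickL, hxy], ?_, hls, (List.pairwise_cons.mp hqs).2, ?_, Or.inr rfl, by simp; omega⟩
      · exact List.perm_middle (a := y) (l₁ := x :: ls') (l₂ := qs')
      · intro z hz
        rcases List.mem_append.mp hz with h | h
        · rcases List.mem_cons.mp h with h | h
          · omega
          · have := (List.pairwise_cons.mp hls).1 z h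
            omega
        · exact (List.pairwise_cons.mp hqs).1 z h

-- one pick removes exactly one element
theorem pickL_len : ∀ (ls qs : List Int), 1 ≤ ls.length + qs.length →
    ∀ v ls' qs', pickL ls qs = (v, ls', qs') →
    ls'.length + qs'.length + 1 = ls.length + qs.length := by
  intro ls qs h v ls' qs' hp
  cases ls with
  | nil =>
    cases qs with
    | nil => simp at h
    | cons y t =>
      simp only [pickL, Prod.mk.injEq] at hp
      obtain ⟨-, h1, h2⟩ := hp
      subst h1; subst h2; simp
  | cons x s =>
    cases qs with
    | nil =>
      simp only [pickL, Prod.mk.injEq] at hp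
      obtain ⟨-, h1, h2⟩ := hp
      subst h1; subst h2; simp
    | cons y t =>
      simp only [pickL] at hp
      split_ifs at hp <;>
        · simp only [Prod.mk.injEq] at hp
          obtain ⟨-, h1, h2⟩ := hp
          subst h1; subst h2; simp
          omega

-- the list-level form of B's loop
def loopL (ls qs : List Int) (t : Int) : Int :=
  if 1 < ls.length + qs.length then
    match h1 : pickL ls qs with
    | (v1, ls1, qs1) =>
      match h2 : pickL ls1 qs1 with
      | (v2, ls2, qs2) =>
        loopL ls2 (qs2 ++ [v1 + v2]) (t + (v1 + v2))
  else t
termination_by ls.length + qs.length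
decreasing_by
  all_goals
    have e1 := pickL_len ls qs (by omega) v1 ls1 qs1 h1
    have e2 := pickL_len ls1 qs1 (by omega) v2 ls2 qs2 h2
    simp only [List.length_append, List.length_cons, List.length_nil]
    omega

-- the loop invariant on the queue of sums: every queued sum is at most the sum of any
-- two other elements still present (so it is at most the next merge sum)
def QInv (ls qs : List Int) : Prop :=
  ∀ q ∈ qs, ∀ x y : Int,
    (x ::ₘ y ::ₘ 0) ≤ ((ls ++ qs : List Int) : Multiset Int).erase q → q ≤ x + y

-- main induction: under the invariant, B's loop computes A's loop on the union
theorem loopL_eq_CintasGo : ∀ (n : Nat), ∀ (f : Nat) (ls qs : List Int) (t : Int),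
    ls.length + qs.length = n → ls.length + qs.length ≤ f + 1 →
    ls.Pairwise (· ≤ ·) → qs.Pairwise (· ≤ ·) →
    QInv ls qs → loopL ls qs t = CintasGo f (ls ++ qs) t := by
  intro n
  induction n using Nat.strong_induction_on with
  | _ n ih =>
    intro f ls qs t hn hf hls hqs hinv
    by_cases hg : 1 < ls.length + qs.length
    · obtain ⟨v1, ls1, qs1, hpk1, hperm1, hls1, hqs1, hmin1, hsub1, hlen1⟩ :=
        pickL_spec ls qs (by
          rcases eq_or_ne ls [] with h | h
          · right; intro h'; rw [h, h'] at hg; simp at hg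
          · exact Or.inl h) hls hqs
      obtain ⟨v2, ls2, qs2, hpk2, hperm2, hls2, hqs2, hmin2, hsub2, hlen2⟩ :=
        pickL_spec ls1 qs1 (by
          rcases eq_or_ne ls1 [] with h | h
          · right; intro h'; rw [h, h'] at hlen1; simp at hlen1; omega
          · exact Or.inl h) hls1 hqs1
      have hv12 : v1 ≤ v2 := hmin1 v2 (hperm2.mem_iff.mpr (by simp))
      have hq2q1 : ∀ q ∈ qs2, q ∈ qs1 := by
        rcases hsub2 with h | h
        · intro q hq; rw [← h]; exact hq
        · intro q hq; rw [h]; exact List.mem_cons_of_mem _ hq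
      have hq2q : ∀ q ∈ qs2, q ∈ qs := by
        rcases hsub1 with h | h
        · intro q hq; rw [← h]; exact hq2q1 q hq
        · intro q hq; rw [h]; exact List.mem_cons_of_mem _ (hq2q1 q hq)
      have hUperm : (ls ++ qs).Perm (v1 :: v2 :: (ls2 ++ qs2)) :=
        hperm1.trans (hperm2.cons v1)
      have hUmul : ((ls ++ qs : List Int) : Multiset Int)
          = v1 ::ₘ v2 ::ₘ ((ls2 ++ qs2 : List Int) : Multiset Int) := by
        rw [Multiset.cons_coe, Multiset.cons_coe]
        exact Multiset.coe_eq_coe.mpr hUperm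
      -- every surviving queued sum is bounded by the merge sum v1 + v2
      have hqle : ∀ q ∈ qs2, q ≤ v1 + v2 := by
        intro q hq
        have hmem : q ∈ ((ls2 ++ qs2 : List Int) : Multiset Int) := by
          simp [Multiset.mem_coe]
          exact Or.inr hq
        obtain ⟨S', hS'⟩ := Multiset.exists_cons_of_mem hmem
        apply hinv q (hq2q q hq) v1 v2
        rw [hUmul, hS', Multiset.cons_swap v2 q, Multiset.cons_swap v1 q,
          Multiset.erase_cons_head]
        exact Multiset.cons_le_cons _ (Multiset.cons_le_cons _ (zero_le _))
      have hmin2' : ∀ z ∈ ls2 ++ qs2, v2 ≤ z := hmin2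
      -- the head of A's sort is v1, then v2, then the sorted rest
      have hsort : pySortI (ls ++ qs)
          = v1 :: v2 :: PySem.List.sorted (ls2 ++ qs2) (fun x => x) false := by
        unfold pySortI
        apply PySem.List.sorted_id_eq_of_perm_of_pairwise
        · exact ((((PySem.List.sorted_perm ..).cons v2).cons v1).trans hUperm.symm)
        · refine List.pairwise_cons.mpr ⟨?_, List.pairwise_cons.mpr ⟨?_, PySem.List.sorted_pairwise ..⟩⟩
          · intro z hz
            rcases List.mem_cons.mp hz with h | h
            · omega
            · have hz' : z ∈ ls2 ++ qs2 := (PySem.List.mem_sorted ..).mp h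
              have := hmin2' z hz'
              omega
          · intro z hz
            exact hmin2' z ((PySem.List.mem_sorted ..).mp hz)
      -- unfold one step of B's loop
      rw [loopL, if_pos hg]
      split
      rename_i w1 ls1' qs1' h1'
      rw [hpk1] at h1'
      obtain ⟨rfl, rfl, rfl⟩ := Prod.mk.injEq .. ▸ h1'
      split
      rename_i w2 ls2' qs2' h2'
      rw [hpk2] at h2'
      obtain ⟨rfl, rfl, rfl⟩ := Prod.mk.injEq .. ▸ h2'
      -- unfold one step of A's loop (the fuel cannot be exhausted here)
      obtain ⟨f', rfl⟩ : ∃ f', f = f' + 1 := by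
        cases f with
        | zero => omega
        | succ f' => exact ⟨f', rfl⟩
      rw [CintasGo, if_pos (by simp only [List.length_append]; omega)]
      split
      case _ c1 c2 rest heq =>
        rw [hsort] at heq
        obtain ⟨rfl, rfl, rfl⟩ := List.cons.injEq .. ▸ (List.cons.injEq .. ▸ heq)
        -- move A on to the same multiset as B
        rw [CintasGo_perm f' _ (ls2 ++ (qs2 ++ [v1 + v2])) _
          (by
            have h1 : (PySem.List.sorted (ls2 ++ qs2) (fun x => x) false ++ [v1 + v2]).Perm
                ((ls2 ++ qs2) ++ [v1 + v2]) := (PySem.List.sorted_perm ..).append_right _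
            exact h1.trans (by rw [List.append_assoc]))]
        -- apply the induction hypothesis to the new state
        apply ih (ls2.length + (qs2.length + 1)) (by omega) f' ls2 (qs2 ++ [v1 + v2])
          (t + (v1 + v2)) (by simp) (by simp; omega) hls2
        · -- the queue of sums stays sorted
          rw [List.pairwise_append]
          refine ⟨hqs2, by simp, ?_⟩
          intro a ha b hb
          simp at hb
          subst hb
          exact hqle a ha
        · -- the invariant is preserved
          intro q hq x y hxy
          have hNmul : ((ls2 ++ (qs2 ++ [v1 + v2]) : List Int) : Multiset Int)
              = (v1 + v2) ::ₘ ((ls2 ++ qs2 : List Int) : Multiset Int) := by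
            rw [Multiset.cons_coe]
            exact Multiset.coe_eq_coe.mpr
              (by rw [← List.append_assoc]; exact List.perm_append_singleton _ _)
          rcases List.mem_append.mp hq with hq2 | hqm
          · -- a surviving old sum
            have hqv2 : v2 ≤ q := hmin2' q (List.mem_append.mpr (Or.inr hq2))
            have hqub : q ≤ v1 + v2 := hqle q hq2
            have hv1nn : 0 ≤ v1 := by omega
            have hmemS : q ∈ ((ls2 ++ qs2 : List Int) : Multiset Int) := by
              simp [Multiset.mem_coe]; exact Or.inr hq2
            obtain ⟨S', hS'⟩ := Multiset.exists_cons_of_mem hmemS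
            rw [hNmul, hS', Multiset.cons_swap (v1 + v2) q S',
              Multiset.erase_cons_head] at hxy
            have hx : x ∈ (v1 + v2) ::ₘ S' :=
              Multiset.mem_of_le hxy (by simp)
            have hy : y ∈ (v1 + v2) ::ₘ S' :=
              Multiset.mem_of_le hxy (by simp)
            have hbound : ∀ z ∈ (v1 + v2) ::ₘ S', v2 ≤ z := by
              intro z hz
              rcases Multiset.mem_cons.mp hz with h | h
              · omega
              · have : z ∈ ((ls2 ++ qs2 : List Int) : Multiset Int) := by
                  rw [hS']; exact Multiset.mem_cons_of_mem h
                exact hmin2' z (Multiset.mem_coe.mp this)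
            have := hbound x hx
            have := hbound y hy
            omega
          · -- the freshly appended sum
            simp at hqm
            subst hqm
            rw [hNmul, Multiset.erase_cons_head] at hxy
            have hx : x ∈ ((ls2 ++ qs2 : List Int) : Multiset Int) :=
              Multiset.mem_of_le hxy (by simp)
            have hy : y ∈ ((ls2 ++ qs2 : List Int) : Multiset Int) :=
              Multiset.mem_of_le hxy (by simp)
            have := hmin2' x (Multiset.mem_coe.mp hx)
            have := hmin2' y (Multiset.mem_coe.mp hy)
            omega
      all_goals
        rename_i heq
        rw [hsort] at heq
        simp at heq
    · rw [loopL, if_neg hg]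
      cases f with
      | zero => rfl
      | succ f => rw [CintasGo, if_neg (by simp only [List.length_append]; omega)]

-- bridge: the index-based port equals the list-level loop
theorem CintasAltGo_eq_loopL : ∀ (n : Nat), ∀ (f : Nat) (leaves sums : List Int) (i j : Nat) (t : Int),
    (leaves.length - i) + (sums.length - j) = n →
    (leaves.length - i) + (sums.length - j) ≤ f + 1 →
    i ≤ leaves.length → j ≤ sums.length →
    CintasAltGo f leaves sums i j t = loopL (leaves.drop i) (sums.drop j) t := by
  intro n
  induction n using Nat.strong_induction_on with
  | _ n ih =>
    intro f leaves sums i j t hn hf hi hj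
    by_cases hg : 1 < (leaves.length - i) + (sums.length - j)
    · obtain ⟨f', rfl⟩ : ∃ f', f = f' + 1 := by
        cases f with
        | zero => omega
        | succ f' => exact ⟨f', rfl⟩
      obtain ⟨v1, i1, j1, ha1, hi1, hj1, hsum1, hp1⟩ :=
        altPick_bridge leaves sums i j hi hj (by omega)
      obtain ⟨v2, i2, j2, ha2, hi2, hj2, hsum2, hp2⟩ :=
        altPick_bridge leaves sums i1 j1 hi1 hj1 (by omega)
      have hdropS : (sums ++ [v1 + v2]).drop j2 = sums.drop j2 ++ [v1 + v2] :=
        List.drop_append_of_le_length hj2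
      rw [CintasAltGo, if_pos hg]
      split
      rename_i v1' i1' j1' h1'
      rw [ha1] at h1'
      obtain ⟨rfl, rfl, rfl⟩ := Prod.mk.injEq .. ▸ h1'
      split
      rename_i v2' i2' j2' h2'
      rw [ha2] at h2'
      obtain ⟨rfl, rfl, rfl⟩ := Prod.mk.injEq .. ▸ h2'
      rw [loopL, if_pos (by simp only [List.length_drop]; omega)]
      split
      rename_i w1 ls1 qs1 hq1
      rw [hp1] at hq1
      obtain ⟨rfl, rfl, rfl⟩ := Prod.mk.injEq .. ▸ hq1
      split
      rename_i w2 ls2 qs2 hq2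
      rw [hp2] at hq2
      obtain ⟨rfl, rfl, rfl⟩ := Prod.mk.injEq .. ▸ hq2
      rw [ih ((leaves.length - i2) + ((sums ++ [v1 + v2]).length - j2)) (by simp; omega)
        f' leaves (sums ++ [v1 + v2]) i2 j2 (t + (v1 + v2)) rfl (by simp; omega)
        hi2 (by simp; omega), hdropS]
    · rw [loopL, if_neg (by simp only [List.length_drop]; omega)]
      cases f with
      | zero => rfl
      | succ f => rw [CintasAltGo, if_neg hg]

-- ===== VERDICT (by name: the statement is the Claim_ definition above) =====
theorem Cintas_spec : Claim_equal_Cintas := by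
  intro cintas _
  unfold Spec_Cintas Cintas Cintas_alt
  rw [CintasAltGo_eq_loopL ((pySortI cintas).length - 0 + (0 - 0)) cintas.length _ _ _ _ _ rfl
      (by simp [pySortI, PySem.List.length_sorted]) (by omega) (by omega)]
  simp only [List.drop_zero, List.drop_nil]
  unfold pySortI
  rw [loopL_eq_CintasGo ((PySem.List.sorted cintas (fun x => x) false).length + 0)
      cintas.length _ _ _ rfl (by simp [PySem.List.length_sorted])
      (PySem.List.sorted_pairwise ..) (by simp) (by intro q hq; simp at hq)]
  simp only [List.append_nil]
  exact (CintasGo_perm cintas.length _ _ _ (PySem.List.sorted_perm ..)).symm
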